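-- pv_equiv track=rewrite | github.com/Pat-van-hoorn/SG2-Lab | data.py | get_ranges_from_mask
-- ===== SOURCE A (Python) =====
-- def get_ranges_from_mask(mask):
--     """Transforms a boolean mask into a list of ranges, represented by tuples"""
--     start = 0
--     end = 0
--     ranges = []
--     while True:
--         while start < len(mask) and mask[start]:
--             start+=1
--         if start >= len(mask):
--             break
--         end = start
--         while end < len(mask) and not mask[end]:
--             end+=1
--         ranges.append((start, end))
--         if end >= len(mask):
--             break
--         start = end
--     return ranges
-- ===== SOURCE B (Python) =====
-- def get_ranges_from_mask(mask):
--     """Transforms a boolean mask into a list of ranges, represented by tuples"""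
--     ranges = []
--     in_run = False
--     start = 0
--     for i, x in enumerate(mask):
--         if x:
--             if in_run:
--                 ranges.append((start, i))
--                 in_run = False
--         else:
--             if not in_run:
--                 start = i
--                 in_run = True
--     if in_run:
--         ranges.append((start, len(mask)))
--     return ranges
-- ===== Notes on version B (the rewrite author's own statement) =====
-- stated objective: simpler
-- what changed: Replaced A's nested two-pointer skip-while loops (while True with inner scans and breaks) by a single flat for-loop over enumerate(mask) maintaining an in_run flag and start index, emitting a range at each falling/rising edge and flushing at the end.
import Mathlib
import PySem

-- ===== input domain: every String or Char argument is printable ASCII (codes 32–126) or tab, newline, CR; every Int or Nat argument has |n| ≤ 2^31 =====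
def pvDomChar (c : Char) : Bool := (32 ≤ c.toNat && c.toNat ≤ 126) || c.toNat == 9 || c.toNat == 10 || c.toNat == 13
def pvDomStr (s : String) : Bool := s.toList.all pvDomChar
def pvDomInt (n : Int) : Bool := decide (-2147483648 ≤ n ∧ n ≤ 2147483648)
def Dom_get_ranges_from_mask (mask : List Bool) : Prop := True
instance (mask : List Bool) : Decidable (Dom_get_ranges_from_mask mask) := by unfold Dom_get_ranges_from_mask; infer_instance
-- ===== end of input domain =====

-- B replaces A's nested two-pointer skip-while loops by one flat pass with an
-- in_run flag (objective: simpler; return values proved identical on all inputs).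

-- ===== PORT A =====
-- inner loop `while start < len(mask) and mask[start]: start += 1`
def skipT (mask : List Bool) (i : Nat) : Nat :=
  if h : i < mask.length then
    if mask[i] then skipT mask (i + 1) else i
  else i
termination_by mask.length - i

-- inner loop `while end < len(mask) and not mask[end]: end += 1`
def skipF (mask : List Bool) (i : Nat) : Nat :=
  if h : i < mask.length then
    if mask[i] then i else skipF mask (i + 1)
  else i
termination_by mask.length - i

theorem skipT_ge (mask : List Bool) (i : Nat) : i ≤ skipT mask i := by
  fun_induction skipT mask i with
  | case1 i h hm ih => omega
  | case2 i h hm => omega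
  | case3 i h => omega

theorem skipF_ge (mask : List Bool) (i : Nat) : i ≤ skipF mask i := by
  fun_induction skipF mask i with
  | case1 i h hm => omega
  | case2 i h hm ih => omega
  | case3 i h => omega

theorem skipT_stop (mask : List Bool) (i : Nat) (h : skipT mask i < mask.length) :
    mask[skipT mask i] = false := by
  fun_induction skipT mask i with
  | case1 i h1 hm ih => exact ih h
  | case2 i h1 hm => simpa using hm
  | case3 i h1 => omega

-- `end` strictly exceeds `start` when the outer loop recurses (used for termination)
theorem skipF_progress (mask : List Bool) (s : Nat) (hs : s < mask.length)
    (hm : mask[s] = false) : s < skipF mask s := by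
  unfold skipF
  simp [hs, hm]
  calc s < s + 1 := by omega
    _ ≤ skipF mask (s + 1) := skipF_ge mask (s + 1)

-- outer `while True` loop of A
def loopA (mask : List Bool) (start : Nat) : List (Int × Int) :=
  let s := skipT mask start
  if hs : s ≥ mask.length then []
  else
    let e := skipF mask s
    ((s : Int), (e : Int)) :: (if e ≥ mask.length then [] else loopA mask e)
termination_by mask.length - start
decreasing_by
  have h1 := skipT_ge mask start
  have h2 := skipF_progress mask (skipT mask start) (by omega)
    (skipT_stop mask start (by omega))
  omega

def get_ranges_from_mask (mask : List Bool) : List (Int × Int) := loopA mask 0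

-- ===== PORT B =====
-- `for i, x in enumerate(mask)` maintaining (in_run, start, ranges)
def altLoop (xs : List Bool) (i : Nat) (inRun : Bool) (start : Int)
    (acc : List (Int × Int)) : Bool × Int × List (Int × Int) :=
  match xs with
  | [] => (inRun, start, acc)
  | x :: rest =>
    if x then
      if inRun then altLoop rest (i + 1) false start (acc ++ [(start, (i : Int))])
      else altLoop rest (i + 1) inRun start acc
    else
      if !inRun then altLoop rest (i + 1) true (i : Int) acc
      else altLoop rest (i + 1) inRun start acc

def get_ranges_from_mask_alt (mask : List Bool) : List (Int × Int) :=
  let st := altLoop mask 0 false 0 []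
  if st.1 then st.2.2 ++ [(st.2.1, (mask.length : Int))] else st.2.2

-- ===== PRECONDITION & SPEC =====
def Spec_get_ranges_from_mask (mask : List Bool) (out : List (Int × Int)) : Prop := out = get_ranges_from_mask_alt mask
instance (mask : List Bool) (out : List (Int × Int)) : Decidable (Spec_get_ranges_from_mask mask out) := by unfold Spec_get_ranges_from_mask; infer_instance

-- ===== CLAIM (what is proved, stated in full; the proofs are below) =====
def Claim_equal_get_ranges_from_mask : Prop := ∀ (mask : List Bool), Dom_get_ranges_from_mask mask → Spec_get_ranges_from_mask mask (get_ranges_from_mask mask)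

-- ===== LEMMAS AND PROOFS =====

theorem skipT_step (mask : List Bool) (i : Nat) (h : i < mask.length)
    (hm : mask[i] = true) : skipT mask i = skipT mask (i + 1) := by
  rw [skipT]; simp [h, hm]

theorem skipF_step (mask : List Bool) (i : Nat) (h : i < mask.length)
    (hm : mask[i] = false) : skipF mask i = skipF mask (i + 1) := by
  rw [skipF]; simp [h, hm]

theorem skipF_id (mask : List Bool) (i : Nat) (h : ¬ (i < mask.length ∧ mask[i]? = some false)) :
    skipF mask i = i := by
  rw [skipF]
  by_cases hl : i < mask.length
  · have : mask[i] = true := by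
      by_contra hc
      exact h ⟨hl, by simp [List.getElem?_eq_getElem hl]; simpa using hc⟩
    simp [hl, this]
  · simp [hl]

theorem loopA_true (mask : List Bool) (i : Nat) (h : i < mask.length)
    (hm : mask[i] = true) : loopA mask i = loopA mask (i + 1) := by
  rw [loopA, loopA, skipT_step mask i h hm]

-- the main invariant: running B's loop from index i (i ≤ len) in either state
-- produces acc ++ what A's outer loop produces from there
theorem main_inv (mask : List Bool) (n : Nat) :
    ∀ i, i ≤ mask.length → mask.length - i = n →
      (∀ s0 acc,
        (let st := altLoop (mask.drop i) i false s0 acc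
         if st.1 then st.2.2 ++ [(st.2.1, (mask.length : Int))] else st.2.2)
        = acc ++ loopA mask i) ∧
      (∀ s acc,
        (let st := altLoop (mask.drop i) i true s acc
         if st.1 then st.2.2 ++ [(st.2.1, (mask.length : Int))] else st.2.2)
        = acc ++ ((s, (skipF mask i : Int)) ::
            (if skipF mask i ≥ mask.length then [] else loopA mask (skipF mask i)))) := by
  induction n with
  | zero =>
    intro i hle hn
    have hi : i = mask.length := by omega
    subst hi
    have hd : mask.drop mask.length = [] := by simp
    have hsF : skipF mask mask.length = mask.length := skipF_id mask _ (by simp)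
    constructor
    · intro s0 acc
      simp [hd, altLoop]
      have : loopA mask mask.length = [] := by
        rw [loopA]
        have := skipT_ge mask mask.length
        simp; omega
      simp [this]
    · intro s acc
      simp [hd, altLoop, hsF]
  | succ n ih =>
    intro i hle hn
    have hi : i < mask.length := by omega
    have hd : mask.drop i = mask[i] :: mask.drop (i + 1) := List.drop_eq_getElem_cons hi
    have ih' := ih (i + 1) (by omega) (by omega)
    constructor
    · intro s0 acc
      by_cases hm : mask[i] = true
      · -- not in run, element true: keep scanning
        simp only [hd, altLoop, hm, if_true, Bool.false_eq_true, if_false]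
        rw [(ih'.1) s0 acc, loopA_true mask i hi hm]
      · -- not in run, element false: open run at i
        simp only [Bool.not_eq_true] at hm
        simp only [hd, altLoop, hm, Bool.false_eq_true, if_false, Bool.not_false, if_true]
        rw [(ih'.2) (i : Int) acc]
        -- A's side: skipT stops at i, then a range (i, skipF mask (i+1))
        conv_rhs => rw [loopA]
        have hsT : skipT mask i = i := by rw [skipT]; simp [hi, hm]
        have hsF : skipF mask i = skipF mask (i + 1) := skipF_step mask i hi hm
        simp only [hsT, ← hsF]
        rw [dif_neg (by omega)]
    · intro s acc
      by_cases hm : mask[i] = true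
      · -- in run, element true: close the run at i
        simp only [hd, altLoop, hm, if_true]
        rw [(ih'.1) s (acc ++ [(s, (i : Int))])]
        have hsF : skipF mask i = i := by rw [skipF]; simp [hi, hm]
        rw [hsF, if_neg (by omega), ← loopA_true mask i hi hm]
        simp
      · -- in run, element false: run continues
        simp only [Bool.not_eq_true] at hm
        simp only [hd, altLoop, hm, Bool.false_eq_true, if_false, Bool.not_true, if_false]
        rw [(ih'.2) s acc, skipF_step mask i hi hm]

-- ===== VERDICT (by name: the statement is the Claim_ definition above) =====
theorem get_ranges_from_mask_spec : Claim_equal_get_ranges_from_mask := by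
  intro mask _
  unfold Spec_get_ranges_from_mask get_ranges_from_mask get_ranges_from_mask_alt
  have h := (main_inv mask mask.length 0 (by omega) (by omega)).1 0 []
  simpa using h.symm
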